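-- pv_equiv track=rewrite | github.com/sbomify/github-action | sbomify_action/_enrichment/license_normalizer.py | parse_deb822_stanzas
-- ===== SOURCE A (Python) =====
-- from typing import Dict, Iterator, Optional, Set
--
-- def parse_deb822_stanzas(text: str) -> Iterator[Dict[str, str]]:
--     """
--     Parse RFC 822-style stanzas from text.
--
--     Yields:
--         Dict of field name -> value for each stanza
--     """
--     cur: Dict[str, str] = {}
--     last_key: Optional[str] = None
--
--     for raw_line in text.splitlines():
--         line = raw_line.rstrip()
--
--         if not line.strip():
--             if cur:
--                 yield cur
--                 cur = {}
--                 last_key = None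
--             continue
--
--         if line.startswith((" ", "\t")) and last_key:
--             cur[last_key] = cur[last_key] + "\n" + line[1:]
--             continue
--
--         if ":" in line:
--             k, v = line.split(":", 1)
--             k = k.strip()
--             # Normalize UK spelling of "Licence" to "License"
--             if k.lower() == "licence":
--                 k = "License"
--             v = v.strip()
--             cur[k] = v
--             last_key = k
--
--     if cur:
--         yield cur
-- ===== SOURCE B (Python) =====
-- def parse_deb822_stanzas(text):
--     """
--     Parse RFC 822-style stanzas from text.
--
--     Two-pass decomposition: first group rstripped non-blank lines into
--     stanzas (split at blank lines), then parse each group independently.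
--
--     Yields:
--         Dict of field name -> value for each stanza
--     """
--     # pass 1: split into groups of rstripped, non-blank lines
--     groups = []
--     group = []
--     for raw_line in text.splitlines():
--         line = raw_line.rstrip()
--         if line:
--             group.append(line)
--         else:
--             if group:
--                 groups.append(group)
--             group = []
--     if group:
--         groups.append(group)
--
--     # pass 2: parse each group with the field/continuation rules
--     for group in groups:
--         cur = {}
--         last_key = None
--         for line in group:
--             if line.startswith((" ", "\t")) and last_key:
--                 cur[last_key] = cur[last_key] + "\n" + line[1:]
--             elif ":" in line:
--                 k, v = line.split(":", 1)
--                 k = k.strip()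
--                 if k.lower() == "licence":
--                     k = "License"
--                 cur[k] = v.strip()
--                 last_key = k
--         if cur:
--             yield cur
-- ===== Notes on version B (the rewrite author's own statement) =====
-- stated objective: alternative
-- what changed: A parses in one interleaved loop that mixes stanza splitting with field parsing in shared mutable state; B is a two-pass decomposition that first groups rstripped non-blank lines into stanzas at blank lines and then parses each group independently, emitting non-empty results via map/filter.
import Mathlib
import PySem

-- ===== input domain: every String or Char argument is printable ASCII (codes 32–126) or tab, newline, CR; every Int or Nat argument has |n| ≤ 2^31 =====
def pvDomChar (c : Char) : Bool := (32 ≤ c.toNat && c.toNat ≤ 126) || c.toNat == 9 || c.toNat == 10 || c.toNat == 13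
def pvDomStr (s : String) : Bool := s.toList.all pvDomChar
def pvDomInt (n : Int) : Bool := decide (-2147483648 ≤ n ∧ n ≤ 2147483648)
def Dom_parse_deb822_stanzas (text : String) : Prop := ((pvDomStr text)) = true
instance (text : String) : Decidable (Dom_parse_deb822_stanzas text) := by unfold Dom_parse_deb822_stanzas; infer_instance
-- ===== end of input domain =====

-- B replaces A's single interleaved loop by a two-pass decomposition (group lines into
-- stanzas at blank lines, then parse each group); same return value, not claimed faster.

-- ===== PORT A =====
-- A's single loop over the lines, carrying (cur, last_key); `yield` becomes cons.
-- `cur[last_key]` is read with getD "": when `last_key` is truthy the key is always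
-- present in cur (it was set together with last_key and never deleted), so this is exact.
def pvGoA : List String → PySem.Dict String String → Option String → List (List (String × String))
  | [], cur, _ => if cur.items.isEmpty then [] else [cur.items]
  | raw :: rest, cur, last =>
    let line := PySem.Str.rstrip raw
    if PySem.Str.strip line = "" then
      (if cur.items.isEmpty then pvGoA rest cur last
       else cur.items :: pvGoA rest PySem.Dict.empty none)
    else if (PySem.Str.startswith line " " || PySem.Str.startswith line "\t")
        && (match last with | some k => k != "" | none => false) then
      let k := last.getD ""
      pvGoA rest (cur.insert k (cur.getD k "" ++ "\n" ++ PySem.Str.slice line (some 1) none)) last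
    else if PySem.Str.isIn ":" line then
      -- line.split(":", 1): ':' occurs in line and sep ≠ "", so exactly two parts
      let parts := (PySem.Str.splitMax? line ":" 1).getD []
      let k0 := PySem.Str.strip (parts.getD 0 "")
      let k := if PySem.Str.lower k0 = "licence" then "License" else k0
      pvGoA rest (cur.insert k (PySem.Str.strip (parts.getD 1 ""))) (some k)
    else pvGoA rest cur last

def parse_deb822_stanzas (text : String) : List (List (String × String)) :=
  pvGoA (PySem.Str.splitlines text) PySem.Dict.empty none

-- ===== PORT B =====
-- pass 1: fold collecting groups of rstripped non-blank lines, split at blank lines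
def pvSplitStepB (st : List (List String) × List String) (raw : String) :
    List (List String) × List String :=
  let line := PySem.Str.rstrip raw
  if line = "" then ((if st.2.isEmpty then st.1 else st.1 ++ [st.2]), [])
  else (st.1, st.2 ++ [line])

def pvGroupsB (lines : List String) : List (List String) :=
  let st := lines.foldl pvSplitStepB ([], [])
  if st.2.isEmpty then st.1 else st.1 ++ [st.2]

-- pass 2: per-group field/continuation step (lines are already rstripped)
def pvStepB (st : PySem.Dict String String × Option String) (line : String) :
    PySem.Dict String String × Option String :=
  if (PySem.Str.startswith line " " || PySem.Str.startswith line "\t")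
      && (match st.2 with | some k => k != "" | none => false) then
    let k := st.2.getD ""
    (st.1.insert k (st.1.getD k "" ++ "\n" ++ PySem.Str.slice line (some 1) none), st.2)
  else if PySem.Str.isIn ":" line then
    let parts := (PySem.Str.splitMax? line ":" 1).getD []
    let k0 := PySem.Str.strip (parts.getD 0 "")
    let k := if PySem.Str.lower k0 = "licence" then "License" else k0
    (st.1.insert k (PySem.Str.strip (parts.getD 1 "")), some k)
  else st

def pvParseGroupB (g : List String) : List (String × String) :=
  (g.foldl pvStepB (PySem.Dict.empty, none)).1.items

def parse_deb822_stanzas_alt (text : String) : List (List (String × String)) :=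
  ((pvGroupsB (PySem.Str.splitlines text)).map pvParseGroupB).filter (fun d => !d.isEmpty)

-- ===== PRECONDITION & SPEC =====
def Spec_parse_deb822_stanzas (text : String) (out : List (List (String × String))) : Prop := out = parse_deb822_stanzas_alt text
instance (text : String) (out : List (List (String × String))) : Decidable (Spec_parse_deb822_stanzas text out) := by unfold Spec_parse_deb822_stanzas; infer_instance

-- ===== CLAIM (what is proved, stated in full; the proofs are below) =====
def Claim_equal_parse_deb822_stanzas : Prop := ∀ (text : String), Dom_parse_deb822_stanzas text → Spec_parse_deb822_stanzas text (parse_deb822_stanzas text)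

-- ===== LEMMAS AND PROOFS =====

-- recursive form of B's splitter, for the induction
def pvSplitR : List String → List String → List (List String)
  | [], g => if g.isEmpty then [] else [g]
  | raw :: rest, g =>
    let line := PySem.Str.rstrip raw
    if line = "" then (if g.isEmpty then [] else [g]) ++ pvSplitR rest []
    else pvSplitR rest (g ++ [line])

lemma pvSplitR_cons_blank (raw : String) (rest : List String) (g : List String)
    (hb : PySem.Str.rstrip raw = "") :
    pvSplitR (raw :: rest) g = (if g.isEmpty then [] else [g]) ++ pvSplitR rest [] := by
  simp only [pvSplitR]
  rw [if_pos hb]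

lemma pvSplitR_cons_nonblank (raw : String) (rest : List String) (g : List String)
    (hb : ¬ PySem.Str.rstrip raw = "") :
    pvSplitR (raw :: rest) g = pvSplitR rest (g ++ [PySem.Str.rstrip raw]) := by
  simp only [pvSplitR]
  rw [if_neg hb]

lemma pvSplit_fold (lines : List String) : ∀ (acc : List (List String)) (g : List String),
    (let st := lines.foldl pvSplitStepB (acc, g)
     if st.2.isEmpty then st.1 else st.1 ++ [st.2]) = acc ++ pvSplitR lines g := by
  induction lines with
  | nil =>
    intro acc g
    by_cases hg : g.isEmpty
    · have hgn : g = [] := List.isEmpty_iff.mp hg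
      subst hgn; simp [pvSplitR]
    · simp [pvSplitR, hg]
  | cons raw rest ih =>
    intro acc g
    by_cases hb : PySem.Str.rstrip raw = ""
    · rw [pvSplitR_cons_blank raw rest g hb]
      have hstep : pvSplitStepB (acc, g) raw
          = ((if g.isEmpty then acc else acc ++ [g]), ([] : List String)) := by
        simp only [pvSplitStepB]
        rw [if_pos hb]
      by_cases hg : g.isEmpty
      · simp only [List.foldl_cons, hstep, ih, hg, if_true]
        simp
      · simp only [List.foldl_cons, hstep, ih, hg]
        simp
    · rw [pvSplitR_cons_nonblank raw rest g hb]
      have hstep : pvSplitStepB (acc, g) raw = (acc, g ++ [PySem.Str.rstrip raw]) := by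
        simp only [pvSplitStepB]
        rw [if_neg hb]
      simp only [List.foldl_cons, hstep, ih]

lemma pvGroupsB_eq (lines : List String) : pvGroupsB lines = pvSplitR lines [] := by
  simpa [pvGroupsB] using pvSplit_fold lines [] []

-- an insert never yields an empty dict
lemma pvInsert_items_ne_nil (d : PySem.Dict String String) (k v : String) :
    (d.insert k v).items ≠ [] := by
  by_cases h : d.contains k = true
  · have hne : d.items ≠ [] := by
      intro hnil
      unfold PySem.Dict.contains at h
      rw [hnil] at h
      simp at h
    simp only [PySem.Dict.insert, if_pos h]
    intro habs
    exact hne (List.map_eq_nil_iff.mp habs)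
  · simp [PySem.Dict.insert, h]

-- invariant of B's parse state: an empty cur forces last_key = None
def pvInv (st : PySem.Dict String String × Option String) : Prop := st.1.items = [] → st.2 = none

lemma pvStepB_inv (st : PySem.Dict String String × Option String) (line : String)
    (h : pvInv st) : pvInv (pvStepB st line) := by
  unfold pvStepB
  split_ifs with h1 h2
  · intro habs; exact absurd habs (pvInsert_items_ne_nil _ _ _)
  · intro habs; exact absurd habs (pvInsert_items_ne_nil _ _ _)
  · exact h

lemma pvFoldB_inv (g : List String) : pvInv (g.foldl pvStepB (PySem.Dict.empty, none)) := by
  have main : ∀ (st : PySem.Dict String String × Option String), pvInv st →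
      pvInv (g.foldl pvStepB st) := by
    induction g with
    | nil => intro st h; exact h
    | cons l ls ih => intro st h; exact ih _ (pvStepB_inv st l h)
  exact main _ (by intro _; rfl)

-- blankness: all-whitespace characterisations of strip/rstrip
lemma pvRstrip_nil_iff (cs : List Char) :
    PySem.Chars.rstrip cs = [] ↔ ∀ c ∈ cs, PySem.Chars.isspace c := by
  simp [PySem.Chars.rstrip, List.dropWhile_eq_nil_iff]

lemma pvStrip_nil_iff (cs : List Char) :
    PySem.Chars.strip cs = [] ↔ ∀ c ∈ cs, PySem.Chars.isspace c := by
  unfold PySem.Chars.strip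
  rw [pvRstrip_nil_iff]
  constructor
  · intro h c hc
    have hsplit : cs = cs.takeWhile PySem.Chars.isspace ++ cs.dropWhile PySem.Chars.isspace :=
      (List.takeWhile_append_dropWhile).symm
    rw [hsplit] at hc
    rcases List.mem_append.mp hc with h1 | h1
    · exact List.mem_takeWhile_imp h1
    · exact h c h1
  · intro h c hc
    exact h c ((List.dropWhile_sublist _).subset hc)

lemma pvStrip_rstrip_eq_nil (s : String) (h : PySem.Str.strip (PySem.Str.rstrip s) = "") :
    PySem.Str.rstrip s = "" := by
  have h2 : PySem.Chars.strip (PySem.Chars.rstrip s.toList) = [] := by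
    have := congrArg String.toList h
    simpa using this
  have h3 : ∀ c ∈ PySem.Chars.rstrip s.toList, PySem.Chars.isspace c :=
    (pvStrip_nil_iff _).mp h2
  have h5 : ∀ c ∈ s.toList, PySem.Chars.isspace c := by
    have hidem : PySem.Chars.rstrip (PySem.Chars.rstrip s.toList)
        = PySem.Chars.rstrip s.toList := by
      unfold PySem.Chars.rstrip
      rw [List.reverse_reverse, List.dropWhile_idempotent]
    have h4 : PySem.Chars.rstrip s.toList = [] := by
      rw [← hidem]
      exact (pvRstrip_nil_iff _).mpr h3
    exact (pvRstrip_nil_iff _).mp h4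
  apply String.toList_eq_nil_iff.mp
  simpa using (pvRstrip_nil_iff s.toList).mpr h5

-- unfolding equations for A's loop
lemma pvGoA_cons_blank (raw : String) (rest : List String)
    (cur : PySem.Dict String String) (last : Option String)
    (hA : PySem.Str.strip (PySem.Str.rstrip raw) = "") :
    pvGoA (raw :: rest) cur last
      = if cur.items.isEmpty then pvGoA rest cur last
        else cur.items :: pvGoA rest PySem.Dict.empty none := by
  simp only [pvGoA]
  rw [if_pos hA]

-- A's non-blank branches are exactly B's per-line step
lemma pvGoA_cons_nonblank (raw : String) (rest : List String)
    (st : PySem.Dict String String × Option String)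
    (hA : ¬ PySem.Str.strip (PySem.Str.rstrip raw) = "") :
    pvGoA (raw :: rest) st.1 st.2
      = pvGoA rest (pvStepB st (PySem.Str.rstrip raw)).1 (pvStepB st (PySem.Str.rstrip raw)).2 := by
  simp only [pvGoA, pvStepB]
  rw [if_neg hA]
  split_ifs <;> rfl

-- the main induction: A's loop started from the state B reaches on pending group g
lemma pvMain (lines : List String) : ∀ g : List String,
    pvGoA lines (g.foldl pvStepB (PySem.Dict.empty, none)).1 (g.foldl pvStepB (PySem.Dict.empty, none)).2
      = ((pvSplitR lines g).map pvParseGroupB).filter (fun d => !d.isEmpty) := by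
  induction lines with
  | nil =>
    intro g
    simp only [pvGoA, pvSplitR]
    by_cases hg : g.isEmpty
    · have hgn : g = [] := List.isEmpty_iff.mp hg
      subst hgn
      rfl
    · rw [if_neg hg]
      by_cases hcur : (g.foldl pvStepB (PySem.Dict.empty, none)).1.items.isEmpty
      · rw [if_pos hcur]
        simp only [List.map_cons, List.map_nil]
        rw [show pvParseGroupB g = [] from List.isEmpty_iff.mp hcur]
        simp
      · rw [if_neg hcur]
        simp [pvParseGroupB, hcur]
  | cons raw rest ih =>
    intro g
    by_cases hb : PySem.Str.rstrip raw = ""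
    · have hA : PySem.Str.strip (PySem.Str.rstrip raw) = "" := by rw [hb]; rfl
      rw [pvGoA_cons_blank raw rest _ _ hA, pvSplitR_cons_blank raw rest g hb]
      have ih0 := ih []
      simp only [List.foldl_nil] at ih0
      by_cases hcur : (g.foldl pvStepB (PySem.Dict.empty, none)).1.items.isEmpty
      · have hnil : (g.foldl pvStepB (PySem.Dict.empty, none)).1.items = [] :=
          List.isEmpty_iff.mp hcur
        have hlast : (g.foldl pvStepB (PySem.Dict.empty, none)).2 = none :=
          pvFoldB_inv g hnil
        have hdict : (g.foldl pvStepB (PySem.Dict.empty, none)).1 = PySem.Dict.empty := by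
          apply PySem.Dict.ext; simpa [PySem.Dict.empty] using hnil
        rw [if_pos hcur, hlast, hdict, ih0]
        by_cases hg : g.isEmpty
        · rw [if_pos hg]; simp
        · rw [if_neg hg]
          simp [pvParseGroupB, hnil]
      · rw [if_neg hcur]
        have hg : ¬ g.isEmpty := by
          intro habs
          have hgn : g = [] := List.isEmpty_iff.mp habs
          subst hgn
          simp [PySem.Dict.empty] at hcur
        rw [if_neg hg, ih0]
        simp only [List.map_append, List.filter_append, List.map_cons, List.map_nil]
        simp [pvParseGroupB, hcur]
    · have hA : ¬ PySem.Str.strip (PySem.Str.rstrip raw) = "" := fun habs =>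
        hb (pvStrip_rstrip_eq_nil raw habs)
      rw [pvGoA_cons_nonblank raw rest _ hA, pvSplitR_cons_nonblank raw rest g hb]
      have hfold : (g ++ [PySem.Str.rstrip raw]).foldl pvStepB (PySem.Dict.empty, none)
          = pvStepB (g.foldl pvStepB (PySem.Dict.empty, none)) (PySem.Str.rstrip raw) := by
        simp [List.foldl_append]
      rw [← hfold]
      exact ih (g ++ [PySem.Str.rstrip raw])

-- ===== VERDICT (by name: the statement is the Claim_ definition above) =====
theorem parse_deb822_stanzas_spec : Claim_equal_parse_deb822_stanzas := by
  intro text _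
  unfold Spec_parse_deb822_stanzas parse_deb822_stanzas parse_deb822_stanzas_alt
  rw [pvGroupsB_eq]
  have h := pvMain (PySem.Str.splitlines text) []
  simpa using h
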